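-- pv_equiv track=rewrite | github.com/NeuroGirl/algorithms-and-data-structure | lab3/task6/src/integer_sort.py | sum_of_tenths
-- ===== SOURCE A (Python) =====
-- def quick_sort(A, l, r):
--     if l < r:
--         m = partition(A, l, r)
--         quick_sort(A, l, m-1)
--         quick_sort(A, m+1, r)
--
-- def partition(A, l, r):
--     x = A[l]
--     j = l
--     for i in range(l+1, r+1):
--         if A[i] <= x:
--             j += 1
--             A[j], A[i] = A[i], A[j]
--     A[l], A[j] = A[j], A[l]
--     return j
--
-- def sum_of_tenths(A, B):
--     C = []
--     for b in B:
--         for a in A: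
--             C.append(int(a) * int(b))
--     quick_sort(C, 0, len(C)-1)
--     sum_of_tenths = sum(C[i] for i in range(0, len(C), 10))
--     return sum_of_tenths
-- ===== SOURCE B (Python) =====
-- def sum_of_tenths(A, B):
--     counts = {}
--     for b in B:
--         for a in A:
--             p = int(a) * int(b)
--             counts[p] = counts.get(p, 0) + 1
--     total = 0
--     start = 0
--     for v in sorted(counts):
--         cnt = counts[v]
--         total += v * ((start + cnt - 1) // 10 - (start - 1) // 10)
--         start += cnt
--     return total
-- ===== Notes on version B (the rewrite author's own statement) =====
-- stated objective: faster
-- what changed: Instead of materialising all n*m products and quicksorting them before summing every 10th element, B tallies product multiplicities in a dict, iterates the sorted distinct products keeping a running start index, and adds each product times the number of stride-10 positions inside its run via floor division.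
import Mathlib
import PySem

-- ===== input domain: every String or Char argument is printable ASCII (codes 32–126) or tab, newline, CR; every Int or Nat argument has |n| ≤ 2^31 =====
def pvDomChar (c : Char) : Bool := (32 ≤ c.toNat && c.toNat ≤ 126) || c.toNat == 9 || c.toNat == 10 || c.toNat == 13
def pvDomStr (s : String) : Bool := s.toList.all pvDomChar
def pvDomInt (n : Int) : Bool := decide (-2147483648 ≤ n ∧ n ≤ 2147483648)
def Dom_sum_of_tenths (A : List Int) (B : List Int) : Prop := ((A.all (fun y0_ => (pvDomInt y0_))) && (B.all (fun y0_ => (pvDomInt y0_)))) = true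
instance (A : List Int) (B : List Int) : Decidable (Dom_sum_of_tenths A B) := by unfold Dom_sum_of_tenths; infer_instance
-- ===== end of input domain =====

-- B replaces A's hand-written quicksort of all n*m products by a dict of product
-- multiplicities: it sorts only the distinct products and adds each product times the
-- number of stride-10 indices falling in its run (objective: faster, as measured by
-- a timing run; A's first-element-pivot quicksort is quadratic on duplicate-heavy
-- product lists).

-- ===== PORT A =====
-- Python 'xs[p], xs[q] = xs[q], xs[p]' (both values read before assignment)
def pySwap (xs : List Int) (p q : Int) : List Int :=
  let vq := PySem.List.pyGetD xs q 0
  let vp := PySem.List.pyGetD xs p 0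
  PySem.List.pySetD (PySem.List.pySetD xs p vq) q vp

def partitionPy (A : List Int) (l r : Int) : List Int × Int :=
  let x := PySem.List.pyGetD A l 0
  let st := (PySem.List.pyRange (l+1) (r+1) 1).foldl
    (fun (st : List Int × Int) i =>
      if PySem.List.pyGetD st.1 i 0 ≤ x then
        (pySwap st.1 (st.2 + 1) i, st.2 + 1)
      else st) (A, l)
  (pySwap st.1 l st.2, st.2)

-- fuel (= list length at the top call) only makes the recursion structural; with
-- fuel ≥ segment size it never runs out (proved in qs_spec below)
def quickSortPy : Nat → List Int → Int → Int → List Int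
  | 0, A, _, _ => A
  | Nat.succ fuel, A, l, r =>
    if l < r then
      let pm := partitionPy A l r
      let A1 := quickSortPy fuel pm.1 l (pm.2 - 1)
      quickSortPy fuel A1 (pm.2 + 1) r
    else A

def sum_of_tenths (A : List Int) (B : List Int) : Int :=
  let C := B.foldl (fun C b => A.foldl (fun C a => C ++ [a * b]) C) []
  let Cs := quickSortPy C.length C 0 ((C.length : Int) - 1)
  ((PySem.List.pyRange 0 (Cs.length : Int) 10).map (fun i => PySem.List.pyGetD Cs i 0)).sum

-- ===== PORT B =====
def sum_of_tenths_alt (A : List Int) (B : List Int) : Int :=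
  let counts := B.foldl (fun d b => A.foldl (fun d a =>
      d.insert (a * b) (d.getD (a * b) 0 + 1)) d) PySem.Dict.empty
  let res := (PySem.List.sorted counts.keys (fun v => v) false).foldl
    (fun (st : Int × Int) v =>
      let cnt := counts.getD v 0
      (st.1 + v * (PySem.Int.floordiv (st.2 + cnt - 1) 10 - PySem.Int.floordiv (st.2 - 1) 10),
       st.2 + cnt)) (0, 0)
  res.1

-- ===== PRECONDITION & SPEC =====
def Spec_sum_of_tenths (A : List Int) (B : List Int) (out : Int) : Prop := out = sum_of_tenths_alt A B
instance (A : List Int) (B : List Int) (out : Int) : Decidable (Spec_sum_of_tenths A B out) := by unfold Spec_sum_of_tenths; infer_instance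

-- ===== CLAIM (what is proved, stated in full; the proofs are below) =====
def Claim_equal_sum_of_tenths : Prop := ∀ (A : List Int) (B : List Int), Dom_sum_of_tenths A B → Spec_sum_of_tenths A B (sum_of_tenths A B)

-- ===== LEMMAS AND PROOFS =====

-- value at a Nat index (proof-side view of Python's A[k])
def gD (A : List Int) (k : Nat) : Int := A.getD k 0

-- the segment A[l:r] (proof-side)
def segN (A : List Int) (l r : Nat) : List Int := (A.take r).drop l

-- sum of elements at positions p with (s+p) % 10 == 0
def P10 (s : Nat) : List Int → Int
  | [] => 0
  | x :: xs => (if s % 10 = 0 then x else 0) + P10 (s+1) xs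

-- head + every later 10th element
def chunkSum : List Int → Int
  | [] => 0
  | x :: t => x + chunkSum (t.drop 9)
  termination_by xs => xs.length
  decreasing_by simp


-- ---- stage 1: pointwise/segment toolkit ----

lemma gD_pyGetD (A : List Int) (i : Int) (h : 0 ≤ i) : PySem.List.pyGetD A i 0 = gD A i.toNat := by
  have hi : i = ((i.toNat : Nat) : Int) := by omega
  rw [hi, PySem.List.pyGetD_natCast]; rfl

lemma gD_set (xs : List Int) (n : Nat) (v : Int) (hn : n < xs.length) (k : Nat) :
    gD (xs.set n v) k = if k = n then v else gD xs k := by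
  unfold gD
  by_cases hk : k < xs.length
  · rw [List.getD_eq_getElem _ _ (by simpa using hk), List.getElem_set]
    split_ifs with h1 h2 h2
    · rfl
    · omega
    · omega
    · rw [List.getD_eq_getElem _ _ hk]
  · rw [List.getD_eq_default _ _ (by simpa using Nat.le_of_not_lt hk),
        List.getD_eq_default _ _ (Nat.le_of_not_lt hk)]
    have : ¬ k = n := by omega
    simp [this]

lemma seg_length (A : List Int) (l r : Nat) : (segN A l r).length = min r A.length - l := by
  simp [segN]

lemma seg_getElem (A : List Int) (l r k : Nat) (h : k < (segN A l r).length) :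
    (segN A l r)[k] = gD A (l + k) := by
  have hk : l + k < A.length := by have := seg_length A l r; omega
  unfold segN gD
  rw [List.getElem_drop, List.getElem_take, List.getD_eq_getElem _ _ hk]

lemma gD_seg (A : List Int) (l r k : Nat) (h : k < (segN A l r).length) :
    gD (segN A l r) k = gD A (l + k) := by
  unfold gD
  rw [List.getD_eq_getElem _ _ h, seg_getElem _ _ _ _ h]
  rfl

lemma seg_nil (A : List Int) (l r : Nat) (h : r ≤ l) : segN A l r = [] := by
  apply List.eq_nil_of_length_eq_zero; rw [seg_length]; omega

lemma seg_all (A : List Int) : segN A 0 A.length = A := by simp [segN]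

lemma seg_singleton (A : List Int) (l : Nat) (h : l < A.length) :
    segN A l (l+1) = [gD A l] := by
  apply List.ext_getElem
  · rw [seg_length]; simp; omega
  · intro i h1 h2
    rw [seg_getElem _ _ _ _ h1]
    have : i = 0 := by rw [seg_length] at h1; omega
    subst this; simp

lemma seg_eq_of_pointwise (A B : List Int) (l r : Nat) (hlen : A.length = B.length)
    (h : ∀ k, l ≤ k → k < r → k < A.length → gD A k = gD B k) :
    segN A l r = segN B l r := by
  apply List.ext_getElem
  · rw [seg_length, seg_length, hlen]
  · intro i h1 h2
    rw [seg_getElem _ _ _ _ h1, seg_getElem _ _ _ _ h2]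
    have := seg_length A l r
    apply h <;> omega

lemma seg_split (A : List Int) (l m r : Nat) (h1 : l ≤ m) (h2 : m ≤ r) :
    segN A l r = segN A l m ++ segN A m r := by
  apply List.ext_getElem
  · rw [seg_length]; simp [seg_length]; omega
  · intro i hi1 hi2
    rw [seg_getElem _ _ _ _ hi1, List.getElem_append]
    have e1 := seg_length A l m
    have e2 := seg_length A m r
    have e0 := seg_length A l r
    split_ifs with h
    · rw [seg_getElem _ _ _ _ h]
    · rw [seg_getElem _ _ _ _ (by omega)]
      congr 1; omega

lemma seg_set (A : List Int) (l r n : Nat) (v : Int) (hl : l ≤ n) (_hr : n < r) (hlen : n < A.length) :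
    segN (A.set n v) l r = (segN A l r).set (n - l) v := by
  apply List.ext_getElem
  · rw [seg_length, List.length_set, List.length_set, seg_length]
  · intro i h1 h2
    rw [seg_getElem _ _ _ _ h1, List.getElem_set,
        gD_set A n v hlen (l + i)]
    have := seg_length A l r
    split_ifs with hc1 hc2 hc2
    · rfl
    · omega
    · omega
    · rw [seg_getElem _ _ _ _ (by simpa using h2)]

lemma count_set (xs : List Int) (n : Nat) (v w : Int) (h : n < xs.length) :
    List.count w (xs.set n v) + (if gD xs n = w then 1 else 0)
      = List.count w xs + (if v = w then 1 else 0) := by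
  rw [List.set_eq_take_append_cons_drop]
  simp only [h, if_true]
  conv_rhs => rw [← List.take_append_drop n xs, ← List.getElem_cons_drop h]
  have hg : gD xs n = xs[n] := by unfold gD; rw [List.getD_eq_getElem _ _ h]
  simp only [List.count_append, List.count_cons, hg]
  simp only [beq_iff_eq]
  split_ifs <;> omega

lemma length_pySwap (A : List Int) (p q : Int) (hp : 0 ≤ p) (hq : 0 ≤ q) :
    (pySwap A p q).length = A.length := by
  rw [pySwap, PySem.List.pySetD_of_nonneg _ _ hp, PySem.List.pySetD_of_nonneg _ _ hq]
  simp

lemma gD_pySwap (A : List Int) (p q : Int) (hp0 : 0 ≤ p) (hp : p < A.length)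
    (hq0 : 0 ≤ q) (hq : q < A.length) (k : Nat) :
    gD (pySwap A p q) k =
      if k = q.toNat then gD A p.toNat else if k = p.toNat then gD A q.toNat else gD A k := by
  rw [pySwap, PySem.List.pySetD_of_nonneg _ _ hp0, PySem.List.pySetD_of_nonneg _ _ hq0,
      gD_pyGetD A q hq0, gD_pyGetD A p hp0]
  rw [gD_set _ _ _ (by simp; omega) k, gD_set _ _ _ (by omega) k]

lemma seg_count_swap (A : List Int) (p q l r : Nat) (hlp : l ≤ p) (hpr : p < r)
    (hlq : l ≤ q) (hqr : q < r) (_hr : r ≤ A.length) (w : Int) :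
    List.count w (segN (pySwap A (p : Int) (q : Int)) l r) = List.count w (segN A l r) := by
  rw [pySwap, PySem.List.pySetD_of_nonneg _ _ (by positivity),
      PySem.List.pySetD_of_nonneg _ _ (by positivity)]
  simp only [PySem.List.pyGetD_natCast, Int.toNat_natCast]
  have hgp : A.getD p 0 = gD A p := rfl
  have hgq : A.getD q 0 = gD A q := rfl
  rw [hgp, hgq]
  rw [seg_set _ _ _ _ _ hlq hqr (by simp; omega), seg_set _ _ _ _ _ hlp hpr (by omega)]
  have hlen := seg_length A l r
  have c1 := count_set (segN A l r) (p - l) (gD A q) w (by omega)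
  have c2 := count_set ((segN A l r).set (p - l) (gD A q)) (q - l) (gD A p) w
      (by rw [List.length_set]; omega)
  have hq' : gD ((segN A l r).set (p - l) (gD A q)) (q - l) = gD A q := by
    rw [gD_set _ _ _ (by omega) _]
    split_ifs with hc
    · rfl
    · rw [gD_seg _ _ _ _ (by omega)]; congr 1; omega
  have hp' : gD (segN A l r) (p - l) = gD A p := by
    rw [gD_seg _ _ _ _ (by omega)]; congr 1; omega
  rw [hq'] at c2; rw [hp'] at c1
  split_ifs at c1 c2 <;> omega


-- ---- stage 2: partition correctness ----

-- proof-side name for the partition loop body (definitionally the lambda in partitionPy)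
def partStep (x : Int) : (List Int × Int) → Int → (List Int × Int) :=
  fun st i => if PySem.List.pyGetD st.1 i 0 ≤ x then (pySwap st.1 (st.2 + 1) i, st.2 + 1) else st

lemma partitionPy_eq (A : List Int) (l r : Int) :
    partitionPy A l r =
      (let st := (PySem.List.pyRange (l+1) (r+1) 1).foldl
          (partStep (PySem.List.pyGetD A l 0)) (A, l)
       (pySwap st.1 l st.2, st.2)) := rfl

-- the partition loop invariant after processing indices l+1 .. hi
def PInv (A0 : List Int) (l r x hi : Int) (st : List Int × Int) : Prop :=
  st.1.length = A0.length ∧ l ≤ st.2 ∧ st.2 ≤ hi ∧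
  (∀ k : Nat, k < A0.length → ((k:Int) < l ∨ r < (k:Int)) → gD st.1 k = gD A0 k) ∧
  (∀ w, List.count w (segN st.1 l.toNat (r+1).toNat) = List.count w (segN A0 l.toNat (r+1).toNat)) ∧
  gD st.1 l.toNat = x ∧
  (∀ k : Nat, l < (k:Int) → (k:Int) ≤ st.2 → gD st.1 k ≤ x) ∧
  (∀ k : Nat, st.2 < (k:Int) → (k:Int) ≤ hi → x < gD st.1 k)

lemma PInv_step (A0 : List Int) (l r x : Int) (h0 : 0 ≤ l) (hr : r < A0.length)
    (st : List Int × Int) (i : Int) (hi1 : l < i) (hi2 : i ≤ r)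
    (h : PInv A0 l r x (i-1) st) : PInv A0 l r x i (partStep x st i) := by
  obtain ⟨h1, h2, h3, h4, h5, h6, h7, h8⟩ := h
  have hlen : (st.1.length : Int) = (A0.length : Int) := by exact_mod_cast h1
  by_cases htest : PySem.List.pyGetD st.1 i 0 ≤ x
  · rw [gD_pyGetD st.1 i (by omega)] at htest
    have hget := gD_pySwap st.1 (st.2+1) i (by omega) (by omega) (by omega) (by omega)
    refine ⟨?_, ?_, ?_, ?_, ?_, ?_, ?_, ?_⟩ <;>
      simp only [partStep, gD_pyGetD st.1 i (by omega : (0:Int) ≤ i), if_pos htest]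
    · rw [length_pySwap _ _ _ (by omega) (by omega)]; exact h1
    · try dsimp only
      omega
    · try dsimp only
      omega
    · intro k hk hout
      rw [hget k]
      have c1 : ¬ k = i.toNat := by omega
      have c2 : ¬ k = (st.2+1).toNat := by omega
      rw [if_neg c1, if_neg c2]; exact h4 k hk hout
    · intro w
      have e1 : (st.2+1) = (((st.2+1).toNat : Nat) : Int) := by omega
      have e2 : i = ((i.toNat : Nat) : Int) := by omega
      rw [show pySwap st.1 (st.2+1) i
            = pySwap st.1 (((st.2+1).toNat : Nat) : Int) ((i.toNat : Nat) : Int) by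
          rw [← e1, ← e2]]
      rw [seg_count_swap st.1 (st.2+1).toNat i.toNat l.toNat (r+1).toNat
            (by omega) (by omega) (by omega) (by omega) (by omega) w]
      exact h5 w
    · rw [hget]
      rw [if_neg (by omega : ¬ l.toNat = i.toNat), if_neg (by omega : ¬ l.toNat = (st.2+1).toNat)]
      exact h6
    · intro k hk1 hk2
      try dsimp only at hk2
      rw [hget k]
      split_ifs with c1 c2
      · rw [show (st.2+1).toNat = i.toNat by omega]; exact htest
      · exact htest
      · exact h7 k hk1 (by omega)
    · intro k hk1 hk2
      try dsimp only at hk1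
      rw [hget k]
      split_ifs with c1 c2
      · exact h8 (st.2+1).toNat (by omega) (by omega)
      · omega
      · exact h8 k (by omega) (by omega)
  · rw [gD_pyGetD st.1 i (by omega)] at htest
    refine ⟨?_, ?_, ?_, ?_, ?_, ?_, ?_, ?_⟩ <;>
      simp only [partStep, gD_pyGetD st.1 i (by omega : (0:Int) ≤ i), if_neg htest]
    · exact h1
    · exact h2
    · omega
    · exact h4
    · exact h5
    · exact h6
    · exact h7
    · intro k hk1 hk2
      by_cases hki : k = i.toNat
      · subst hki; omega
      · exact h8 k hk1 (by omega)

lemma partition_loop (A0 : List Int) (l r x : Int) (h0 : 0 ≤ l) (hr : r < A0.length)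
    (hx : x = gD A0 l.toNat) :
    ∀ n : Nat, l + n ≤ r →
      PInv A0 l r x (l + n)
        ((PySem.List.pyRange (l+1) (l + n + 1) 1).foldl (partStep x) (A0, l)) := by
  intro n
  induction n with
  | zero =>
    intro _
    rw [show l + ((0:Nat):Int) + 1 = l + 1 by push_cast; ring,
        PySem.List.pyRange_one_eq_nil (by omega), List.foldl_nil]
    refine ⟨rfl, ?_, ?_, fun k hk hout => rfl, fun w => rfl, hx.symm, ?_, ?_⟩
    · omega
    · omega
    · intro k hk1 hk2
      omega
    · intro k hk1 hk2
      omega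
  | succ n ih =>
    intro hn
    have hn' : l + (n:Int) ≤ r := by push_cast at hn ⊢; omega
    have e1 : l + ((n+1 : Nat):Int) + 1 = (l + (n:Int) + 1) + 1 := by push_cast; ring
    rw [e1, PySem.List.pyRange_one_succ_right (by omega), List.foldl_append,
        List.foldl_cons, List.foldl_nil]
    have step := PInv_step A0 l r x h0 hr
      ((PySem.List.pyRange (l+1) (l + (n:Int) + 1) 1).foldl (partStep x) (A0, l))
      (l + (n:Int) + 1) (by omega) (by omega)
      (by rw [show l + (n:Int) + 1 - 1 = l + (n:Int) by ring]; exact ih hn')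
    rw [show l + ((n+1 : Nat):Int) = l + (n:Int) + 1 by push_cast; ring]
    exact step

lemma partition_spec (A : List Int) (l r : Int) (h0 : 0 ≤ l) (hlr : l < r) (hr : r < A.length) :
    (partitionPy A l r).1.length = A.length ∧
    l ≤ (partitionPy A l r).2 ∧ (partitionPy A l r).2 ≤ r ∧
    (∀ k : Nat, k < A.length → ((k:Int) < l ∨ r < (k:Int)) →
        gD (partitionPy A l r).1 k = gD A k) ∧
    (∀ w, List.count w (segN (partitionPy A l r).1 l.toNat (r+1).toNat)
        = List.count w (segN A l.toNat (r+1).toNat)) ∧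
    gD (partitionPy A l r).1 (partitionPy A l r).2.toNat = gD A l.toNat ∧
    (∀ k : Nat, l ≤ (k:Int) → (k:Int) < (partitionPy A l r).2 →
        gD (partitionPy A l r).1 k ≤ gD A l.toNat) ∧
    (∀ k : Nat, (partitionPy A l r).2 < (k:Int) → (k:Int) ≤ r →
        gD A l.toNat < gD (partitionPy A l r).1 k) := by
  have hx := gD_pyGetD A l h0
  have hn : l + (((r - l).toNat : Nat) : Int) = r := by omega
  have HL := partition_loop A l r (PySem.List.pyGetD A l 0) h0 hr hx (r - l).toNat (by omega)
  rw [hn] at HL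
  obtain ⟨h1, h2, h3, h4, h5, h6, h7, h8⟩ := HL
  rw [partitionPy_eq]
  set st := (PySem.List.pyRange (l+1) (r+1) 1).foldl (partStep (PySem.List.pyGetD A l 0)) (A, l) with hst
  dsimp only
  have hlen : (st.1.length : Int) = (A.length : Int) := by exact_mod_cast h1
  have hget := gD_pySwap st.1 l st.2 (by omega) (by omega) (by omega) (by omega)
  refine ⟨?_, by simpa using h2, by simpa using h3, ?_, ?_, ?_, ?_, ?_⟩
  · rw [length_pySwap _ _ _ (by omega) (by omega)]; exact h1
  · intro k hk hout
    try dsimp only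
    rw [hget k, if_neg (by omega : ¬ k = st.2.toNat), if_neg (by omega : ¬ k = l.toNat)]
    exact h4 k hk hout
  · intro w
    try dsimp only
    have e1 : l = ((l.toNat : Nat) : Int) := by omega
    have e2 : st.2 = ((st.2.toNat : Nat) : Int) := by omega
    rw [show pySwap st.1 l st.2 = pySwap st.1 ((l.toNat : Nat) : Int) ((st.2.toNat : Nat) : Int) by
          rw [← e1, ← e2]]
    rw [seg_count_swap st.1 l.toNat st.2.toNat l.toNat (r+1).toNat
          (by omega) (by omega) (by omega) (by omega) (by omega) w]
    exact h5 w
  · try dsimp only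
    rw [hget, if_pos rfl]
    exact h6.trans hx
  · intro k hk1 hk2
    try dsimp only at hk2 ⊢
    rw [hget k]
    split_ifs with c1 c2
    · omega
    · -- k = l.toNat, value is old value at st.2; l < st.2 here
      rw [← hx]
      exact h7 st.2.toNat (by omega) (by omega)
    · rw [← hx]
      exact h7 k (by omega) (by omega)
  · intro k hk1 hk2
    try dsimp only at hk1 ⊢
    rw [hget k]
    rw [if_neg (by omega : ¬ k = st.2.toNat), if_neg (by omega : ¬ k = l.toNat)]
    rw [← hx]
    exact h8 k (by omega) (by omega)


-- ---- stage 3: quicksort correctness ----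

lemma pairwise_of_len_le_one {R : Int → Int → Prop} (xs : List Int) (h : xs.length ≤ 1) :
    xs.Pairwise R := by
  cases xs with
  | nil => simp
  | cons x t =>
    cases t with
    | nil => simp
    | cons y u => simp at h

lemma mem_seg (A : List Int) (l r : Nat) (y : Int) (h : y ∈ segN A l r) :
    ∃ k, l ≤ k ∧ k < r ∧ k < A.length ∧ gD A k = y := by
  obtain ⟨i, hi, hy⟩ := List.mem_iff_getElem.mp h
  have hl := seg_length A l r
  refine ⟨l + i, by omega, by omega, by omega, ?_⟩
  rw [← seg_getElem A l r i hi, hy]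

lemma qs_spec : ∀ (fuel : Nat) (A : List Int) (l r : Int), 0 ≤ l → r < A.length →
    (r - l + 1).toNat ≤ fuel →
    (quickSortPy fuel A l r).length = A.length ∧
    (∀ k : Nat, k < A.length → ((k:Int) < l ∨ r < (k:Int)) →
        gD (quickSortPy fuel A l r) k = gD A k) ∧
    (∀ w, List.count w (segN (quickSortPy fuel A l r) l.toNat (r+1).toNat)
        = List.count w (segN A l.toNat (r+1).toNat)) ∧
    (segN (quickSortPy fuel A l r) l.toNat (r+1).toNat).Pairwise (· ≤ ·) := by
  intro fuel
  induction fuel with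
  | zero =>
    intro A l r h0 hr hfuel
    refine ⟨rfl, fun k hk hout => rfl, fun w => rfl, ?_⟩
    rw [seg_nil _ _ _ (by omega)]
    exact List.Pairwise.nil
  | succ fuel ih =>
    intro A l r h0 hr hfuel
    by_cases hlr : l < r
    · simp only [quickSortPy, if_pos hlr]
      obtain ⟨p1, p2, p3, p4, p5, p6, p7, p8⟩ := partition_spec A l r h0 hlr hr
      set pm := partitionPy A l r with hpm
      set A1 := pm.1 with hA1
      set m := pm.2 with hm
      have hlen1 : (A1.length : Int) = (A.length : Int) := by exact_mod_cast p1
      obtain ⟨q1, q2, q3, q4⟩ := ih A1 l (m-1) h0 (by omega) (by omega)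
      set A2 := quickSortPy fuel A1 l (m-1) with hA2
      have hlen2 : (A2.length : Int) = (A.length : Int) := by rw [q1]; exact hlen1
      have em : m - 1 + 1 = m := by ring
      rw [em] at q3 q4
      obtain ⟨s1, s2, s3, s4⟩ := ih A2 (m+1) r (by omega) (by omega) (by omega)
      set A3 := quickSortPy fuel A2 (m+1) r with hA3
      have hlen3 : (A3.length : Int) = (A.length : Int) := by rw [s1]; exact hlen2
      have em1 : (m+1).toNat = m.toNat + 1 := by omega
      rw [em1] at s3 s4
      -- abbreviations
      have hln : (l.toNat : Int) = l := by omega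
      have hmn : (m.toNat : Int) = m := by omega
      have hrn : ((r+1).toNat : Int) = r + 1 := by omega
      -- A3 agrees with A2 below m+1, A2 agrees with A1 above m-1
      have e32 : ∀ u v : Nat, (v : Int) ≤ m + 1 → segN A3 u v = segN A2 u v := by
        intro u v hv
        exact seg_eq_of_pointwise _ _ _ _ (by omega) (fun k hk1 hk2 hk3 => s2 k (by omega) (by omega))
      have e21 : ∀ u v : Nat, m ≤ (u : Int) → segN A2 u v = segN A1 u v := by
        intro u v hu
        exact seg_eq_of_pointwise _ _ _ _ (by omega) (fun k hk1 hk2 hk3 => q2 k (by omega) (by omega))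
      refine ⟨?_, ?_, ?_, ?_⟩
      · rw [s1, q1, p1]
      · intro k hk hout
        rw [s2 k (by omega) (by omega), q2 k (by omega) (by omega), p4 k hk hout]
      · intro w
        rw [seg_split A3 l.toNat (m.toNat+1) (r+1).toNat (by omega) (by omega),
            List.count_append,
            e32 l.toNat (m.toNat+1) (by omega), s3 w,
            ← List.count_append,
            ← seg_split A2 l.toNat (m.toNat+1) (r+1).toNat (by omega) (by omega)]
        rw [seg_split A2 l.toNat m.toNat (r+1).toNat (by omega) (by omega), List.count_append,
            q3 w, e21 m.toNat (r+1).toNat (by omega),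
            ← List.count_append, ← seg_split A1 l.toNat m.toNat (r+1).toNat (by omega) (by omega)]
        exact p5 w
      · -- sortedness of [l, r+1)
        have hx := p6
        have e3 : segN A3 l.toNat (r+1).toNat
            = segN A2 l.toNat m.toNat ++ [gD A1 m.toNat] ++ segN A3 (m.toNat+1) (r+1).toNat := by
          rw [seg_split A3 l.toNat m.toNat (r+1).toNat (by omega) (by omega),
              seg_split A3 m.toNat (m.toNat+1) (r+1).toNat (by omega) (by omega),
              seg_singleton A3 m.toNat (by omega),
              show gD A3 m.toNat = gD A1 m.toNat by
                rw [s2 m.toNat (by omega) (by omega), q2 m.toNat (by omega) (by omega)],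
              e32 l.toNat m.toNat (by omega), ← List.append_assoc]
        rw [e3]
        -- members of the left part are ≤ pivot, members of the right part are > pivot
        have hmemL : ∀ a, a ∈ segN A2 l.toNat m.toNat → a ≤ gD A l.toNat := by
          intro a ha
          have hperm : (segN A2 l.toNat m.toNat).Perm (segN A1 l.toNat m.toNat) :=
            List.perm_iff_count.mpr (fun w => q3 w)
          have ha1 : a ∈ segN A1 l.toNat m.toNat := hperm.mem_iff.mp ha
          obtain ⟨k, hk1, hk2, hk3, hk4⟩ := mem_seg _ _ _ _ ha1
          rw [← hk4]
          exact p7 k (by omega) (by omega)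
        have hmemR : ∀ b, b ∈ segN A3 (m.toNat+1) (r+1).toNat → gD A l.toNat < b := by
          intro b hb
          have hperm : (segN A3 (m.toNat+1) (r+1).toNat).Perm (segN A2 (m.toNat+1) (r+1).toNat) :=
            List.perm_iff_count.mpr (fun w => s3 w)
          have hb2 : b ∈ segN A2 (m.toNat+1) (r+1).toNat := hperm.mem_iff.mp hb
          rw [e21 (m.toNat+1) (r+1).toNat (by omega)] at hb2
          obtain ⟨k, hk1, hk2, hk3, hk4⟩ := mem_seg _ _ _ _ hb2
          rw [← hk4]
          exact p8 k (by omega) (by omega)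
        rw [List.pairwise_append, List.pairwise_append]
        refine ⟨⟨q4, by simp, ?_⟩, s4, ?_⟩
        · intro a ha b hb
          simp only [List.mem_singleton] at hb
          subst hb
          rw [p6]
          exact hmemL a ha
        · intro a ha b hb
          rw [List.mem_append] at ha
          have hxb := hmemR b hb
          rcases ha with ha | ha
          · exact le_of_lt (lt_of_le_of_lt (hmemL a ha) hxb)
          · simp only [List.mem_singleton] at ha
            subst ha
            rw [p6]
            exact le_of_lt hxb
    · have hq : quickSortPy (fuel+1) A l r = A := by simp [quickSortPy, hlr]
      rw [hq]
      refine ⟨rfl, fun k hk hout => rfl, fun w => rfl, ?_⟩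
      apply pairwise_of_len_le_one
      rw [seg_length]; omega

lemma qs_sorts (C : List Int) :
    quickSortPy C.length C 0 ((C.length : Int) - 1) = PySem.List.sorted C (fun v => v) false := by
  obtain ⟨e1, _, e3, e4⟩ := qs_spec C.length C 0 ((C.length : Int) - 1)
    (by omega) (by omega) (by omega)
  have hz : ((0:Int)).toNat = 0 := rfl
  have hN : ((C.length : Int) - 1 + 1).toNat = C.length := by omega
  rw [hz, hN] at e3 e4
  set X := quickSortPy C.length C 0 ((C.length : Int) - 1) with hX
  have hseg : segN X 0 C.length = X := by rw [← e1]; exact seg_all X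
  have hsegC : segN C 0 C.length = C := seg_all C
  rw [hseg, hsegC] at e3
  rw [hseg] at e4
  exact (PySem.List.sorted_id_eq_of_perm_of_pairwise C X (List.perm_iff_count.mpr e3) e4).symm


-- ---- stage 4: stride sums, replicate buckets, counter dict ----

lemma P10_add_ten : ∀ (xs : List Int) (s : Nat), P10 (s + 10) xs = P10 s xs := by
  intro xs
  induction xs with
  | nil => intro s; rfl
  | cons x t ih =>
    intro s
    simp only [P10, Nat.add_mod_right]
    rw [show s + 10 + 1 = (s + 1) + 10 by omega, ih]

lemma P10_append : ∀ (xs ys : List Int) (s : Nat),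
    P10 s (xs ++ ys) = P10 s xs + P10 (s + xs.length) ys := by
  intro xs
  induction xs with
  | nil => intro ys s; simp [P10]
  | cons x t ih =>
    intro ys s
    simp only [List.cons_append, P10]
    rw [ih, show s + (x :: t).length = (s + 1) + t.length by simp; omega]
    ring

lemma P10_shift : ∀ (t : List Int) (s : Nat), 1 ≤ s → s ≤ 10 →
    P10 s t = P10 0 (t.drop (10 - s)) := by
  intro t
  induction t with
  | nil => intros; simp [P10]
  | cons y t' ih =>
    intro s h1 h2
    by_cases hs : s = 10
    · subst hs
      simp only [Nat.sub_self, List.drop_zero]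
      rw [show (10:Nat) = 0 + 10 from rfl, P10_add_ten]
    · simp only [P10]
      rw [if_neg (by omega)]
      rw [ih (s+1) (by omega) (by omega)]
      rw [show 10 - s = (10 - (s+1)) + 1 by omega, List.drop_succ_cons]
      ring

lemma chunk_eq_P10 (xs : List Int) : chunkSum xs = P10 0 xs := by
  have H : ∀ (n : Nat) (ys : List Int), ys.length ≤ n → chunkSum ys = P10 0 ys := by
    intro n
    induction n with
    | zero =>
      intro ys h
      cases ys with
      | nil => simp [chunkSum, P10]
      | cons y t => simp at h
    | succ n ih =>
      intro ys h
      cases ys with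
      | nil => simp [chunkSum, P10]
      | cons y t =>
        rw [chunkSum, ih (t.drop 9) (by simp at h ⊢; omega)]
        simp only [P10, Nat.zero_mod]
        rw [P10_shift t 1 (by omega) (by omega)]
        norm_num
  exact H xs.length xs (le_refl _)

lemma pyRange_ten_cons (a b : Int) (h : a < b) :
    PySem.List.pyRange a b 10 = a :: PySem.List.pyRange (a + 10) b 10 := by
  rw [PySem.List.pyRange_of_pos a b (by norm_num), PySem.List.pyRange_of_pos (a+10) b (by norm_num),
      if_pos h]
  by_cases h2 : a + 10 < b
  · rw [if_pos h2]
    have e : (b - a + 10 - 1)/10 = (b - (a+10) + 10 - 1)/10 + 1 := by omega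
    have hge : 0 ≤ (b - (a+10) + 10 - 1)/10 := by omega
    rw [e, show ((b - (a+10) + 10 - 1)/10 + 1).toNat = ((b - (a+10) + 10 - 1)/10).toNat + 1 by omega,
        List.range_succ_eq_map]
    simp only [List.map_cons, List.map_map]
    congr 1
    · norm_num
    · apply List.map_congr_left
      intro k _
      simp only [Function.comp_apply]
      push_cast
      ring
  · rw [if_neg h2]
    have e : (b - a + 10 - 1)/10 = 1 := by omega
    rw [e]
    simp

lemma stride_chunk : ∀ (N : Nat) (xs : List Int) (a : Nat), xs.length - a ≤ N →
    ((PySem.List.pyRange (a : Int) (xs.length : Int) 10).map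
        (fun i => PySem.List.pyGetD xs i 0)).sum = chunkSum (xs.drop a) := by
  intro N
  induction N with
  | zero =>
    intro xs a h
    rw [PySem.List.pyRange_of_pos _ _ (by norm_num), if_neg (by omega)]
    rw [List.drop_eq_nil_of_le (by omega)]
    simp [chunkSum]
  | succ N ih =>
    intro xs a h
    by_cases ha : a < xs.length
    · rw [pyRange_ten_cons _ _ (by omega), List.map_cons, List.sum_cons]
      rw [show (a : Int) + 10 = ((a + 10 : Nat) : Int) by push_cast; ring]
      rw [ih xs (a + 10) (by omega)]
      have hd : xs.drop a = xs[a] :: xs.drop (a + 1) := (List.getElem_cons_drop ha).symm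
      rw [hd, chunkSum, List.drop_drop, show a + 1 + 9 = a + 10 by omega]
      rw [PySem.List.pyGetD_natCast, List.getD_eq_getElem _ _ ha]
    · rw [PySem.List.pyRange_of_pos _ _ (by norm_num), if_neg (by omega)]
      rw [List.drop_eq_nil_of_le (by omega)]
      simp [chunkSum]

lemma P10_replicate : ∀ (c : Nat) (s : Nat) (v : Int),
    P10 s (List.replicate c v) = v * (((s:Int) + c - 1)/10 - ((s:Int) - 1)/10) := by
  intro c
  induction c with
  | zero =>
    intro s v
    simp only [List.replicate, P10, Nat.cast_zero]
    rw [show (s:Int) + 0 - 1 = (s:Int) - 1 by ring]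
    ring
  | succ c ih =>
    intro s v
    rw [List.replicate_succ', P10_append, ih, List.length_replicate]
    simp only [P10]
    by_cases hdiv : (s + c) % 10 = 0
    · rw [if_pos hdiv]
      have h10 : ((s:Int) + c)/10 = ((s:Int) + c - 1)/10 + 1 := by omega
      rw [show (s:Int) + ((c:Nat)+1 : Nat) - 1 = (s:Int) + c by push_cast; ring, h10]
      ring
    · rw [if_neg hdiv]
      have h10 : ((s:Int) + c)/10 = ((s:Int) + c - 1)/10 := by omega
      rw [show (s:Int) + ((c:Nat)+1 : Nat) - 1 = (s:Int) + c by push_cast; ring, h10]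
      ring

lemma bucket_fold : ∀ (K : List Int) (m : Int → Nat) (t : Int) (s : Nat),
    (K.foldl (fun (st : Int × Int) v =>
        (st.1 + v * (PySem.Int.floordiv (st.2 + (m v : Int) - 1) 10
                      - PySem.Int.floordiv (st.2 - 1) 10),
         st.2 + (m v : Int))) (t, (s : Int))).1
      = t + P10 s (K.flatMap fun v => List.replicate (m v) v) := by
  intro K
  induction K with
  | nil => intro m t s; simp [P10]
  | cons v K ih =>
    intro m t s
    rw [List.foldl_cons]
    dsimp only
    rw [show (s:Int) + (m v : Int) = ((s + m v : Nat) : Int) by push_cast; ring]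
    rw [ih]
    rw [List.flatMap_cons, P10_append, P10_replicate, List.length_replicate]
    simp only [PySem.Int.floordiv_eq_ediv_of_pos (show (0:Int) < 10 by norm_num)]
    push_cast
    ring

lemma count_flatMap_replicate (K : List Int) (m : Int → Nat) (hK : K.Nodup) (v : Int) :
    List.count v (K.flatMap fun k => List.replicate (m k) k) = if v ∈ K then m v else 0 := by
  induction K with
  | nil => simp
  | cons k K ih =>
    obtain ⟨hk, hK'⟩ := List.nodup_cons.mp hK
    rw [List.flatMap_cons, List.count_append, ih hK', List.count_replicate]
    by_cases hv : v = k
    · subst hv; simp [hk]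
    · simp [hv, Ne.symm hv]

lemma pairwise_flatMap_replicate (K : List Int) (m : Int → Nat) (hK : K.Pairwise (· < ·)) :
    (K.flatMap fun k => List.replicate (m k) k).Pairwise (· ≤ ·) := by
  induction K with
  | nil => simp
  | cons k K ih =>
    obtain ⟨hk, hK'⟩ := List.pairwise_cons.mp hK
    rw [List.flatMap_cons, List.pairwise_append]
    refine ⟨List.pairwise_replicate.mpr (Or.inr (le_refl k)), ih hK', ?_⟩
    intro a ha b hb
    have ha' : a = k := List.eq_of_mem_replicate ha
    obtain ⟨k', hk', hb'⟩ := List.mem_flatMap.mp hb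
    have hb'' : b = k' := List.eq_of_mem_replicate hb'
    subst ha'; subst hb''
    exact le_of_lt (hk _ hk')

lemma sorted_flat (C : List Int) :
    PySem.List.sorted C (fun v => v) false
      = (PySem.List.sorted (PySem.Set.ofList C) (fun v => v) false).flatMap
          (fun v => List.replicate (List.count v C) v) := by
  set K := PySem.List.sorted (PySem.Set.ofList C) (fun v => v) false with hK
  have hlt : K.Pairwise (· < ·) := PySem.List.sorted_ofList_pairwise_lt C
  have hnd : K.Nodup := hlt.imp (fun h => ne_of_lt h)
  have hmem : ∀ v, v ∈ K ↔ v ∈ C := fun v =>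
    (PySem.List.mem_sorted _ _ _ v).trans (PySem.Set.mem_ofList C v)
  apply PySem.List.sorted_id_eq_of_perm_of_pairwise
  · apply List.perm_iff_count.mpr
    intro v
    rw [count_flatMap_replicate K _ hnd v]
    by_cases hv : v ∈ C
    · rw [if_pos ((hmem v).mpr hv)]
    · rw [if_neg (fun h => hv ((hmem v).mp h))]
      exact (List.count_eq_zero.mpr hv).symm
  · exact pairwise_flatMap_replicate K _ hlt

lemma alt_eq_P10 (A B : List Int) :
    sum_of_tenths_alt A B
      = P10 0 (PySem.List.sorted (B.foldl (fun C b => A.foldl (fun C a => C ++ [a * b]) C) [])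
          (fun v => v) false) := by
  unfold sum_of_tenths_alt
  dsimp only
  set C := B.foldl (fun C b => A.foldl (fun C a => C ++ [a * b]) C) ([] : List Int) with hC
  have hCflat : C = B.flatMap (fun b => A.map (fun a => a * b)) := by
    rw [hC, PySem.List.foldl_congr_mem B _ (fun Cc b => Cc ++ A.map (fun a => a * b)) []
          (fun acc x _ => PySem.List.foldl_append_singleton_eq_map (fun a => a * x) A acc),
        PySem.List.foldl_append_eq_flatMap, List.nil_append]
  have hcounter : B.foldl (fun d b => A.foldl (fun d a =>
        d.insert (a * b) (d.getD (a * b) 0 + 1)) d) PySem.Dict.empty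
      = PySem.Dict.counter C := by
    rw [PySem.List.foldl_congr_mem B _
          (fun d b => (A.map (fun a => a * b)).foldl
            (fun d x => d.insert x (d.getD x 0 + 1)) d) PySem.Dict.empty
          (fun acc b _ => by simp only [List.foldl_map]),
        ← List.foldl_flatMap, ← hCflat]
    exact PySem.Dict.foldl_insert_getD_add_one_eq_counter C
  rw [hcounter, PySem.Dict.keys_counter]
  set K := PySem.List.sorted (PySem.Set.ofList C) (fun v => v) false with hKdef
  have hfold : K.foldl (fun (st : Int × Int) v =>
        let cnt := (PySem.Dict.counter C).getD v 0
        (st.1 + v * (PySem.Int.floordiv (st.2 + cnt - 1) 10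
                      - PySem.Int.floordiv (st.2 - 1) 10), st.2 + cnt)) (0, 0)
      = K.foldl (fun (st : Int × Int) v =>
        (st.1 + v * (PySem.Int.floordiv (st.2 + ((List.count v C : Nat) : Int) - 1) 10
                      - PySem.Int.floordiv (st.2 - 1) 10),
         st.2 + ((List.count v C : Nat) : Int))) (0, 0) := by
    apply PySem.List.foldl_congr_mem
    intro acc v _
    rw [PySem.Dict.getD_counter]
  rw [hfold]
  have h0 : ((0:Nat) : Int) = (0 : Int) := rfl
  rw [show ((0:Int), (0:Int)) = ((0:Int), ((0:Nat) : Int)) by rw [h0]]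
  rw [bucket_fold K (fun v => List.count v C) 0 0, zero_add]
  rw [← sorted_flat C]

theorem sum_of_tenths_spec : Claim_equal_sum_of_tenths := by
  intro A B _
  unfold Spec_sum_of_tenths
  rw [alt_eq_P10]
  unfold sum_of_tenths
  dsimp only
  set C := B.foldl (fun C b => A.foldl (fun C a => C ++ [a * b]) C) ([] : List Int) with hC
  rw [qs_sorts C]
  set S := PySem.List.sorted C (fun v => v) false with hS
  have hstr := stride_chunk S.length S 0 (by omega)
  rw [List.drop_zero, chunk_eq_P10] at hstr
  rw [Nat.cast_zero] at hstr
  exact hstr
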